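-- pv_equiv track=rewrite | github.com/MrBrantCode/unitest_baseline | mut_generate/mist_train_taco/taco_1943/solution.py | find_lucky_permutation
-- ===== SOURCE A (Python) =====
-- def find_lucky_permutation(n):
--     if n % 4 != 0 and n % 4 != 1:
--         return -1
--
--     L = [0] * (n + 1)
--     X = [False] * (n + 1)
--
--     for i in range(1, n + 1):
--         if X[i]:
--             continue
--         X[i] = True
--         X[n - i + 1] = True
--         for j in range(i + 1, n + 1):
--             if X[j]:
--                 continue
--             X[j] = True
--             X[n - j + 1] = True
--             L[i] = j
--             L[n - i + 1] = n - j + 1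
--             L[j] = n - i + 1
--             L[n - j + 1] = i
--             break
--
--     if n % 4 == 1:
--         L[n // 2 + 1] = n // 2 + 1
--
--     return L[1:]
-- ===== SOURCE B (Python) =====
-- def find_lucky_permutation(n):
--     if n % 4 != 0 and n % 4 != 1:
--         return -1
--     L = [0] * (n + 1)
--     i = 1
--     while i + 1 <= n - i:
--         L[i] = i + 1
--         L[i + 1] = n - i + 1
--         L[n - i + 1] = n - i
--         L[n - i] = i
--         i += 2
--     if n % 4 == 1:
--         L[n // 2 + 1] = n // 2 + 1
--     return L[1:]
-- ===== Notes on version B (the rewrite author's own statement) =====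
-- stated objective: simpler
-- what changed: Replaces the used-marker array and the nested inner scan for the first free partner with a single direct loop that assigns the four positions of each 4-cycle (i, i+1, n-i, n-i+1) in closed form, stepping i by 2.
-- outside the precondition, e.g. on find_lucky_permutation(2): A returns -1, B returns -1; on find_lucky_permutation(3): A returns -1, B returns -1; on find_lucky_permutation(-1): A returns -1, B returns -1
import Mathlib
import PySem

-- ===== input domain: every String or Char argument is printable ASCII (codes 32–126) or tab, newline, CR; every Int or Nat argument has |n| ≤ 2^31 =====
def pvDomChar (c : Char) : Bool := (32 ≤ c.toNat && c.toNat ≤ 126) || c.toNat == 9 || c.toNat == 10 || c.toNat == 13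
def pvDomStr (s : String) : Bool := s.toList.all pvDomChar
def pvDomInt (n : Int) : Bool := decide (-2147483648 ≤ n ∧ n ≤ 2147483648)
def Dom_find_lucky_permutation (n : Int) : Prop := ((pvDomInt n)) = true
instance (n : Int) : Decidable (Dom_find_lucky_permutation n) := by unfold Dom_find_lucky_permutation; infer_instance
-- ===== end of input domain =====

-- B replaces A's used-marker array and nested first-free-partner scan by directly
-- assigning each 4-cycle's four positions in one pass (objective: simpler).

-- ===== PORT A =====
-- inner loop 'for j in range(i+1, n+1): …' of A; the 'break' is the non-recursive else branch
def innerA (n i : Int) (L : List Int) (X : List Bool) : List Int → List Int × List Bool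
  | [] => (L, X)
  | j :: rest =>
    if PySem.List.pyGetD X j false then innerA n i L X rest
    else
      (PySem.List.pySetD (PySem.List.pySetD (PySem.List.pySetD (PySem.List.pySetD L i j)
          (n - i + 1) (n - j + 1)) j (n - i + 1)) (n - j + 1) i,
       PySem.List.pySetD (PySem.List.pySetD X j true) (n - j + 1) true)

-- outer loop 'for i in range(1, n+1): …' of A
def outerA (n : Int) : List Int → List Int → List Bool → List Int × List Bool
  | [], L, X => (L, X)
  | i :: rest, L, X =>
    if PySem.List.pyGetD X i false then outerA n rest L X
    else
      let X1 := PySem.List.pySetD (PySem.List.pySetD X i true) (n - i + 1) true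
      let s := innerA n i L X1 (PySem.List.pyRange (i + 1) (n + 1) 1)
      outerA n rest s.1 s.2

def find_lucky_permutation (n : Int) : List Int :=
  if PySem.Int.mod n 4 ≠ 0 ∧ PySem.Int.mod n 4 ≠ 1 then []  -- Python returns -1 here (not a list); outside Pre_
  else
    let s := outerA n (PySem.List.pyRange 1 (n + 1) 1)
              (List.replicate (n + 1).toNat (0 : Int)) (List.replicate (n + 1).toNat false)
    let L1 := if PySem.Int.mod n 4 = 1 then
        PySem.List.pySetD s.1 (PySem.Int.floordiv n 2 + 1) (PySem.Int.floordiv n 2 + 1)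
      else s.1
    PySem.List.slice L1 (some 1) none  -- L[1:]

-- ===== PORT B =====
-- 'while i + 1 <= n - i: … ; i += 2' of B
def altLoop (n i : Int) (L : List Int) : List Int :=
  if i + 1 ≤ n - i then
    altLoop n (i + 2)
      (PySem.List.pySetD (PySem.List.pySetD (PySem.List.pySetD (PySem.List.pySetD L i (i + 1))
        (i + 1) (n - i + 1)) (n - i + 1) (n - i)) (n - i) i)
  else L
termination_by (n - 2 * i).toNat
decreasing_by omega

def find_lucky_permutation_alt (n : Int) : List Int :=
  if PySem.Int.mod n 4 ≠ 0 ∧ PySem.Int.mod n 4 ≠ 1 then []  -- Python returns -1 here (not a list); outside Pre_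
  else
    let L := altLoop n 1 (List.replicate (n + 1).toNat (0 : Int))
    let L1 := if PySem.Int.mod n 4 = 1 then
        PySem.List.pySetD L (PySem.Int.floordiv n 2 + 1) (PySem.Int.floordiv n 2 + 1)
      else L
    PySem.List.slice L1 (some 1) none  -- L[1:]

-- ===== PRECONDITION & SPEC =====
-- Pre_ excludes n % 4 ∈ {2,3}, where A returns the int -1 (not a value of type List Int;
-- both Pythons return -1 there), and n % 4 = 1 with n < 1, where both Pythons raise IndexError.
def Pre_find_lucky_permutation (n : Int) : Prop :=
  PySem.Int.mod n 4 = 0 ∨ (PySem.Int.mod n 4 = 1 ∧ 1 ≤ n)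
instance (n : Int) : Decidable (Pre_find_lucky_permutation n) := by
  unfold Pre_find_lucky_permutation; infer_instance

def pvWitness_find_lucky_permutation : Int := (8)

def Spec_find_lucky_permutation (n : Int) (out : List Int) : Prop := out = find_lucky_permutation_alt n
instance (n : Int) (out : List Int) : Decidable (Spec_find_lucky_permutation n out) := by unfold Spec_find_lucky_permutation; infer_instance

-- ===== CLAIM (what is proved, stated in full; the proofs are below) =====
def Claim_equal_find_lucky_permutation : Prop := ∀ (n : Int), Dom_find_lucky_permutation n → Pre_find_lucky_permutation n → Spec_find_lucky_permutation n (find_lucky_permutation n)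

-- ===== LEMMAS AND PROOFS =====

-- which cells A's marker array X has set to True when the outer loop reaches index i
def markF (n i k : Int) : Bool := decide (1 ≤ k ∧ (k < i ∨ n - i + 1 < k))

lemma getD_setD (X : List Bool) (i k : Int) (hi : 0 ≤ i) (hk : 0 ≤ k) (v : Bool) :
    PySem.List.pyGetD (PySem.List.pySetD X i v) k false =
      if k = i ∧ i < (X.length : Int) then v else PySem.List.pyGetD X k false := by
  rw [PySem.List.pySetD_of_nonneg X v hi]
  obtain ⟨a, rfl⟩ := Int.eq_ofNat_of_zero_le hk
  obtain ⟨b, rfl⟩ := Int.eq_ofNat_of_zero_le hi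
  rw [PySem.List.pyGetD_natCast, PySem.List.pyGetD_natCast]
  simp only [Int.toNat_natCast, List.getD, List.getElem?_set]
  split_ifs <;> simp_all <;> omega

lemma inner_skip (n i : Int) (L : List Int) (X : List Bool) (l : List Int)
    (h : ∀ j ∈ l, PySem.List.pyGetD X j false = true) :
    innerA n i L X l = (L, X) := by
  induction l with
  | nil => rfl
  | cons j rest ih =>
    rw [innerA, h j (List.mem_cons_self ..)]
    exact ih (fun j hj => h j (List.mem_cons_of_mem _ hj))

lemma outer_skip (n : Int) (L : List Int) (X : List Bool) (l : List Int)
    (h : ∀ j ∈ l, PySem.List.pyGetD X j false = true) :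
    outerA n l L X = (L, X) := by
  induction l with
  | nil => rfl
  | cons j rest ih =>
    rw [outerA, h j (List.mem_cons_self ..)]
    exact ih (fun j hj => h j (List.mem_cons_of_mem _ hj))

theorem mainEq (n i : Int) (L : List Int) (X : List Bool) (hi : 1 ≤ i)
    (hX : X.length = (n + 1).toNat)
    (hinv : ∀ k, 0 ≤ k → k ≤ n → PySem.List.pyGetD X k false = markF n i k) :
    (outerA n (PySem.List.pyRange i (n + 1) 1) L X).1 = altLoop n i L := by
  have hlen : (X.length : Int) = n + 1 ∨ n + 1 ≤ 0 := by omega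
  by_cases hcond : i + 1 ≤ n - i
  · -- active iteration: A pairs i with j = i + 1 and marks i, i+1, n-i, n-i+1
    have hXlen : (X.length : Int) = n + 1 := by omega
    rw [PySem.List.pyRange_one_cons (by omega : i < n + 1), outerA]
    have hXi : PySem.List.pyGetD X i false = false := by
      rw [hinv i (by omega) (by omega)]; simp only [markF, decide_eq_false_iff_not]; omega
    rw [hXi]
    simp only [Bool.false_eq_true, if_false]
    rw [PySem.List.pyRange_one_cons (by omega : i + 1 < n + 1), innerA]
    have hX1 : PySem.List.pyGetD
        (PySem.List.pySetD (PySem.List.pySetD X i true) (n - i + 1) true) (i + 1) false = false := by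
      rw [getD_setD _ _ _ (by omega) (by omega), if_neg (by omega),
          getD_setD _ _ _ (by omega) (by omega), if_neg (by omega),
          hinv (i + 1) (by omega) (by omega)]
      simp only [markF, decide_eq_false_iff_not]; omega
    rw [hX1]
    simp only [Bool.false_eq_true, if_false]
    rw [outerA]
    set X2 := PySem.List.pySetD (PySem.List.pySetD
        (PySem.List.pySetD (PySem.List.pySetD X i true) (n - i + 1) true) (i + 1) true)
        (n - (i + 1) + 1) true with hX2def
    have hlen2 : X2.length = (n + 1).toNat := by
      simp only [hX2def, PySem.List.length_pySetD, hX]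
    have hX2get : ∀ k, 0 ≤ k → PySem.List.pyGetD X2 k false =
        if k = i ∨ k = i + 1 ∨ k = n - i ∨ k = n - i + 1 then true
        else PySem.List.pyGetD X k false := by
      intro k hk
      rw [hX2def, getD_setD _ _ _ (by omega) hk, getD_setD _ _ _ (by omega) hk,
          getD_setD _ _ _ (by omega) hk, getD_setD _ _ _ (by omega) hk]
      simp only [PySem.List.length_pySetD, hX]
      split_ifs <;> first | rfl | omega
    have hX2i1 : PySem.List.pyGetD X2 (i + 1) false = true := by
      rw [hX2get (i + 1) (by omega), if_pos (by omega)]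
    rw [hX2i1]
    simp only [if_true]
    -- recursive step
    have hrec := mainEq n (i + 2)
      (PySem.List.pySetD (PySem.List.pySetD (PySem.List.pySetD (PySem.List.pySetD L i (i + 1))
        (n - i + 1) (n - (i + 1) + 1)) (i + 1) (n - i + 1)) (n - (i + 1) + 1) i)
      X2 (by omega) hlen2
      (by
        intro k hk hkn
        rw [hX2get k hk, hinv k hk hkn]
        by_cases h : k = i ∨ k = i + 1 ∨ k = n - i ∨ k = n - i + 1
        · rw [if_pos h]; symm; simp only [markF, decide_eq_true_iff]; omega
        · rw [if_neg h]; simp only [markF, decide_eq_decide]; omega)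
    rw [show i + 1 + 1 = i + 2 from by ring, hrec]
    -- B performs the same four assignments (middle two swapped); commute them
    conv_rhs => rw [altLoop]
    rw [if_pos hcond]
    simp only [show n - (i + 1) + 1 = n - i from by ring]
    congr 1
    rw [PySem.List.pySetD_of_nonneg _ _ (by omega : (0:Int) ≤ i),
        PySem.List.pySetD_of_nonneg _ _ (by omega : (0:Int) ≤ n - i + 1),
        PySem.List.pySetD_of_nonneg _ _ (by omega : (0:Int) ≤ i + 1),
        PySem.List.pySetD_of_nonneg _ _ (by omega : (0:Int) ≤ n - i),
        PySem.List.pySetD_of_nonneg _ _ (by omega : (0:Int) ≤ i + 1),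
        PySem.List.pySetD_of_nonneg _ _ (by omega : (0:Int) ≤ n - i + 1),
        PySem.List.pySetD_of_nonneg _ _ (by omega : (0:Int) ≤ n - i)]
    have hsw : ((L.set i.toNat (i + 1)).set (n - i + 1).toNat (n - i)).set (i + 1).toNat (n - i + 1)
        = ((L.set i.toNat (i + 1)).set (i + 1).toNat (n - i + 1)).set (n - i + 1).toNat (n - i) :=
      List.set_comm _ _ (show (n - i + 1).toNat ≠ (i + 1).toNat from by omega)
    rw [hsw]
  · -- no pair left: both loops stop (A may still mark the middle cell, changing no L entry)
    rw [altLoop, if_neg hcond]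
    by_cases hend : n + 1 ≤ i
    · rw [PySem.List.pyRange_one_eq_nil hend]; rfl
    · have hXlen : (X.length : Int) = n + 1 := by omega
      rw [PySem.List.pyRange_one_cons (by omega : i < n + 1), outerA]
      by_cases h2 : n - i + 1 < i
      · have hXi : PySem.List.pyGetD X i false = true := by
          rw [hinv i (by omega) (by omega)]; simp only [markF, decide_eq_true_iff]; omega
        rw [hXi]
        simp only [if_true]
        rw [outer_skip n L X _ (by
          intro j hj
          rw [PySem.List.mem_pyRange_one] at hj
          rw [hinv j (by omega) (by omega)]
          simp only [markF, decide_eq_true_iff]; omega)]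
      · have hXi : PySem.List.pyGetD X i false = false := by
          rw [hinv i (by omega) (by omega)]; simp only [markF, decide_eq_false_iff_not]; omega
        rw [hXi]
        simp only [Bool.false_eq_true, if_false]
        have hall : ∀ j ∈ PySem.List.pyRange (i + 1) (n + 1) 1,
            PySem.List.pyGetD (PySem.List.pySetD (PySem.List.pySetD X i true) (n - i + 1) true)
              j false = true := by
          intro j hj
          rw [PySem.List.mem_pyRange_one] at hj
          rw [getD_setD _ _ _ (by omega) (by omega)]
          simp only [PySem.List.length_pySetD, hX]
          by_cases hje : j = n - i + 1
          · rw [if_pos (by omega)]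
          · rw [if_neg (by omega), getD_setD _ _ _ (by omega) (by omega), if_neg (by omega),
                hinv j (by omega) (by omega)]
            simp only [markF, decide_eq_true_iff]; omega
        rw [inner_skip n i L _ _ hall, outer_skip n L _ _ hall]
termination_by (n + 1 - i).toNat
decreasing_by omega

lemma getD_replicate_false (m : Nat) (k : Int) (hk : 0 ≤ k) :
    PySem.List.pyGetD (List.replicate m false) k false = false := by
  obtain ⟨a, rfl⟩ := Int.eq_ofNat_of_zero_le hk
  rw [PySem.List.pyGetD_natCast]
  simp [List.getD]

-- ===== VERDICT (by name: the statement is the Claim_ definition above) =====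
theorem find_lucky_permutation_spec : Claim_equal_find_lucky_permutation := by
  intro n hdom hpre
  unfold Spec_find_lucky_permutation find_lucky_permutation find_lucky_permutation_alt
  have hguard : ¬ (PySem.Int.mod n 4 ≠ 0 ∧ PySem.Int.mod n 4 ≠ 1) := by
    rintro ⟨h0, h1⟩
    rcases hpre with h | ⟨h, _⟩
    · exact h0 h
    · exact h1 h
  rw [if_neg hguard, if_neg hguard]
  have hmain := mainEq n 1 (List.replicate (n + 1).toNat (0 : Int))
    (List.replicate (n + 1).toNat false) le_rfl (by simp)
    (by
      intro k hk hkn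
      rw [getD_replicate_false _ _ hk]
      symm; simp only [markF, decide_eq_false_iff_not]; omega)
  simp only [hmain]
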